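-- pv_equiv track=rewrite | github.com/Tom-top/clearmap_trailmap_gui | ClearMap/Tomek_Utilities.py | combinlisterep
-- ===== SOURCE A (Python) =====
-- def combinliste(seq, k):
--     p = []
--     i, imax = 0, 2**len(seq)-1
--     while i<=imax:
--         s = []
--         j, jmax = 0, len(seq)-1
--         while j<=jmax:
--             if (i>>j)&1==1:
--                 s.append(seq[j])
--             j += 1
--         if len(s)==k:
--             p.append(s)
--         i += 1
--     return p
--
-- def combinlisterep(seq, k):
--     """Renvoie la liste des combinaisons avec répétition des objets de seq pris k à k"""
--     # ajoute chaque objet de seq pour quils apparaissent chacun k fois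
--     seq2 = []
--     for elem in seq:
--         if elem not in seq2:
--             for i in range(0,k):
--                 seq2.append(elem)
--     # calcule la liste "normale" des combinaisons
--     p = combinliste(seq2, k)
--     # élimine de cette liste les éléments identiques (comme [1,2] et [1,2])
--     p2 = []
--     for x in p:
--         if x not in p2 and len(set(x)) > 1:
--             p2.append(x)
--     # et renvoie le résultat
--     return p2
-- ===== SOURCE B (Python) =====
-- def combinlisterep(seq, k):
--     """Renvoie la liste des combinaisons avec répétition des objets de seq pris k à k"""
--     # distinct elements in first-appearance order
--     uniques = []
--     for e in seq:
--         if e not in uniques: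
--             uniques.append(e)
--
--     # generate all size-`budget` multisets over the reversed unique list by
--     # count assignment: the head of `rev` (A's LAST unique) takes c = 0..budget
--     # copies, appended AFTER the combinations of the remaining uniques.
--     def gen(rev, budget):
--         if not rev:
--             return [[]] if budget == 0 else []
--         last, rest = rev[0], rev[1:]
--         out = []
--         for c in range(budget + 1):
--             tail = [last] * c
--             for r in gen(rest, budget - c):
--                 out.append(r + tail)
--         return out
--
--     return [x for x in gen(uniques[::-1], k) if len(set(x)) > 1]
-- ===== Notes on version B (the rewrite author's own statement) =====
-- stated objective: alternative
-- what changed: A enumerates all 2^(u*k) bitmasks over a list with every distinct element repeated k times and then deduplicates; B generates each multiset exactly once by recursive count assignment over the distinct elements (processed last-to-first, count ascending), which reproduces A's exact output order without any mask enumeration or dedup pass (it avoids A's exponential-in-u*k scan, but on inputs where both finish within budget a timing run could not confirm the label, so no speed is claimed).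
import Mathlib
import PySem

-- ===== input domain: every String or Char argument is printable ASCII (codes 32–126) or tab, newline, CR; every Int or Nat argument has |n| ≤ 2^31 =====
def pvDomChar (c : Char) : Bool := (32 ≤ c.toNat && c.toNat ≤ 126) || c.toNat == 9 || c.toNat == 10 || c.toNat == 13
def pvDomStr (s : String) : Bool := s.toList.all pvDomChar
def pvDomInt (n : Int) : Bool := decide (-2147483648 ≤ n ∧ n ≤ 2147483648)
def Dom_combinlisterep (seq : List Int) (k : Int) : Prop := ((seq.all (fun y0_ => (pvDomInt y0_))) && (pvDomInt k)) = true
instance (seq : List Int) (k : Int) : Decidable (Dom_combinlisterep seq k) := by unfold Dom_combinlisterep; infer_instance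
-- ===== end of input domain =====

-- B replaces A's bitmask enumeration + dedup by a recursive count-assignment generator
-- over the distinct elements, producing each multiset exactly once in A's order
-- (objective: alternative algorithm).

-- ===== PORT A =====
-- literal port of combinliste: while-loops over i (masks) and j (bit index) become folds
-- over the same integer ranges; (i>>j)&1 uses Int shift (j ≥ 0 here) and PySem.Int.band.
-- the inner j-loop of combinliste (s-accumulation), kept as a named helper
def combinlisteInner (seq : List Int) (i : Int) : List Int :=
  (PySem.List.pyRange 0 ((seq.length : Int) - 1 + 1) 1).foldl (fun s j =>
    if PySem.Int.band (i >>> j.toNat) 1 = 1 then s ++ [PySem.List.pyGetD seq j 0] else s) []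

def combinliste (seq : List Int) (k : Int) : List (List Int) :=
  (PySem.List.pyRange 0 ((2 : Int) ^ seq.length - 1 + 1) 1).foldl (fun p i =>
    let s := combinlisteInner seq i
    if (s.length : Int) = k then p ++ [s] else p) []

def combinlisterep (seq : List Int) (k : Int) : List (List Int) :=
  let seq2 := seq.foldl (fun seq2 elem =>
    if elem ∉ seq2 then
      (PySem.List.pyRange 0 k 1).foldl (fun seq2 _ => seq2 ++ [elem]) seq2
    else seq2) []
  let p := combinliste seq2 k
  p.foldl (fun p2 x =>
    if x ∉ p2 ∧ 1 < PySem.Set.len (PySem.Set.ofList x) then p2 ++ [x] else p2) []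

-- ===== PORT B =====
-- gen(rev, budget): head of rev (the LAST unique) takes c = 0..budget copies appended
-- after each combination of the remaining uniques.
def pvGen (rev : List Int) (budget : Int) : List (List Int) :=
  match rev with
  | [] => if budget = 0 then [[]] else []
  | last :: rest =>
    (PySem.List.pyRange 0 (budget + 1) 1).foldl (fun out c =>
      let tail := PySem.List.pyRepeat [last] c
      (pvGen rest (budget - c)).foldl (fun out r => out ++ [r ++ tail]) out) []

def combinlisterep_alt (seq : List Int) (k : Int) : List (List Int) :=
  let uniques := seq.foldl (fun u e => if e ∉ u then u ++ [e] else u) []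
  -- uniques[::-1] : slice? with step -1 always succeeds (step ≠ 0)
  (pvGen ((PySem.List.slice? uniques none none (-1)).getD []) k).filter
    (fun x => 1 < PySem.Set.len (PySem.Set.ofList x))

-- ===== PRECONDITION & SPEC =====
def Spec_combinlisterep (seq : List Int) (k : Int) (out : List (List Int)) : Prop := out = combinlisterep_alt seq k
instance (seq : List Int) (k : Int) (out : List (List Int)) : Decidable (Spec_combinlisterep seq k out) := by unfold Spec_combinlisterep; infer_instance

-- ===== CLAIM (what is proved, stated in full; the proofs are below) =====
def Claim_equal_combinlisterep : Prop := ∀ (seq : List Int) (k : Int), Dom_combinlisterep seq k → Spec_combinlisterep seq k (combinlisterep seq k)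


-- ===== LEMMAS AND PROOFS =====

-- subset of zs selected by the bits of the mask m (low bit ↔ head)
def subN : List Int → Nat → List Int
  | [], _ => []
  | z :: zs, m => (if m % 2 = 1 then [z] else []) ++ subN zs (m / 2)

-- first-occurrence dedup with an explicit seen-list
def fdgo {α : Type} [DecidableEq α] : List α → List α → List α
  | [], _ => []
  | x :: xs, seen => if x ∈ seen then fdgo xs seen else x :: fdgo xs (x :: seen)

-- number of set bits among the low c bits
def pcN : Nat → Nat → Nat
  | 0, _ => 0
  | c + 1, m => m % 2 + pcN c (m / 2)

-- blocks of k' copies per unique, built from the LAST unique (head of rs) outward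
def seq2For (k' : Nat) : List Int → List Int
  | [] => []
  | u :: rest => seq2For k' rest ++ List.replicate k' u

-- all count assignments 0..k' per unique, colex order (head of rs = outermost key)
def genAll (k' : Nat) : List Int → List (List Int)
  | [] => [[]]
  | u :: rest => (List.range (k' + 1)).flatMap (fun c => (genAll k' rest).map (· ++ List.replicate c u))

-- count assignments with exact budget b (Nat-level mirror of pvGen)
def genN : List Int → Nat → List (List Int)
  | [], b => if b = 0 then [[]] else []
  | u :: rest, b => (List.range (b + 1)).flatMap (fun c => (genN rest (b - c)).map (· ++ List.replicate c u))

lemma fdgo_congr_seen {α : Type} [DecidableEq α] :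
    ∀ (l s s' : List α), (∀ x ∈ l, x ∈ s ↔ x ∈ s') → fdgo l s = fdgo l s' := by
  intro l
  induction l with
  | nil => intro s s' _; rfl
  | cons x xs ih =>
    intro s s' h
    have hx := h x (by simp)
    by_cases hxs : x ∈ s
    · simp [fdgo, hxs, hx.mp hxs]
      exact ih _ _ (fun y hy => h y (by simp [hy]))
    · have hxs' : x ∉ s' := fun hc => hxs (hx.mpr hc)
      simp [fdgo, hxs, hxs']
      exact ih _ _ (fun y hy => by simp [h y (by simp [hy])])

lemma fdgo_append {α : Type} [DecidableEq α] (B : List α) :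
    ∀ (A s s' : List α), (∀ x, x ∈ s' ↔ x ∈ A ∨ x ∈ s) →
      fdgo (A ++ B) s = fdgo A s ++ fdgo B s' := by
  intro A
  induction A with
  | nil =>
    intro s s' h
    simp only [List.nil_append, fdgo]
    exact fdgo_congr_seen B s s' (fun x _ => by simpa using (h x).symm)
  | cons a A ih =>
    intro s s' h
    by_cases ha : a ∈ s
    · simp only [List.cons_append, fdgo, if_pos ha]
      exact ih s s' (fun x => by
        rw [h x, List.mem_cons]
        constructor
        · rintro ((rfl | hx) | hx)
          · exact Or.inr ha
          · exact Or.inl hx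
          · exact Or.inr hx
        · tauto)
    · simp only [List.cons_append, fdgo, if_neg ha]
      rw [ih (a :: s) s' (fun x => by
        rw [h x]
        by_cases hxa : x = a <;> simp [hxa])]

lemma fdgo_nil_of_sub {α : Type} [DecidableEq α] :
    ∀ (l s : List α), (∀ x ∈ l, x ∈ s) → fdgo l s = [] := by
  intro l
  induction l with
  | nil => intro s _; rfl
  | cons x xs ih =>
    intro s h
    simp only [fdgo, if_pos (h x (by simp))]
    exact ih s (fun y hy => h y (by simp [hy]))

lemma mem_fdgo {α : Type} [DecidableEq α] (x : α) :
    ∀ (l s : List α), x ∈ fdgo l s ↔ x ∈ l ∧ x ∉ s := by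
  intro l
  induction l with
  | nil => intro s; simp [fdgo]
  | cons y ys ih =>
    intro s
    by_cases hy : y ∈ s
    · rw [fdgo, if_pos hy, ih]
      constructor
      · rintro ⟨h1, h2⟩; exact ⟨by simp [h1], h2⟩
      · rintro ⟨h1, h2⟩
        rcases List.mem_cons.mp h1 with h | h
        · exact absurd (h ▸ hy) h2
        · exact ⟨h, h2⟩
    · rw [fdgo, if_neg hy]
      by_cases hxy : x = y
      · subst hxy; simp [hy]
      · simp [hxy, ih, List.mem_cons]

lemma nodup_fdgo {α : Type} [DecidableEq α] :
    ∀ (l s : List α), (fdgo l s).Nodup := by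
  intro l
  induction l with
  | nil => intro s; simp [fdgo]
  | cons x xs ih =>
    intro s
    by_cases hx : x ∈ s
    · rw [fdgo, if_pos hx]; exact ih s
    · rw [fdgo, if_neg hx]
      refine List.nodup_cons.mpr ⟨?_, ih _⟩
      intro hc
      exact ((mem_fdgo x xs (x :: s)).mp hc).2 (by simp)

lemma fdgo_map {α β : Type} [DecidableEq α] [DecidableEq β] (f : α → β)
    (hf : Function.Injective f) :
    ∀ (l s : List α), fdgo (l.map f) (s.map f) = (fdgo l s).map f := by
  intro l
  induction l with
  | nil => intro s; rfl
  | cons x xs ih =>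
    intro s
    have hmem : f x ∈ s.map f ↔ x ∈ s := List.mem_map_of_injective hf
    by_cases hx : x ∈ s
    · simp only [List.map_cons, fdgo, if_pos (hmem.mpr hx), if_pos hx, ih]
    · simp only [List.map_cons, fdgo, if_neg (fun hc => hx (hmem.mp hc)), if_neg hx,
        List.map_cons]
      rw [← ih (x :: s)]; rfl

lemma fdgo_single {α : Type} [DecidableEq α] (v : α) :
    ∀ (l s : List α), v ∈ l → v ∉ s → (∀ x ∈ l, x = v ∨ x ∈ s) → fdgo l s = [v] := by
  intro l
  induction l with
  | nil => intro s h; simp at h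
  | cons x xs ih =>
    intro s hv hvs hall
    by_cases hx : x ∈ s
    · rw [fdgo, if_pos hx]
      have hvxs : v ∈ xs := by
        rcases List.mem_cons.mp hv with h | h
        · exact absurd (h ▸ hx) hvs
        · exact h
      exact ih s hvxs hvs (fun y hy => hall y (by simp [hy]))
    · have hxv : x = v := by
        rcases hall x (by simp) with h | h
        · exact h
        · exact absurd h hx
      subst hxv
      rw [fdgo, if_neg hx]
      rw [fdgo_nil_of_sub xs (x :: s) (fun y hy => by
        rcases hall y (by simp [hy]) with h | h
        · simp [h]
        · simp [h])]

lemma fdgo_flatMap {α β : Type} [DecidableEq α] [DecidableEq β] (S : β → List α)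
    (hdisj : ∀ y y' x, y ≠ y' → x ∈ S y → x ∉ S y') :
    ∀ (ys : List β) (seen : List α) (processed : List β),
      (∀ x, x ∈ seen ↔ ∃ y ∈ processed, x ∈ S y) →
      fdgo (ys.flatMap S) seen = (fdgo ys processed).flatMap (fun y => fdgo (S y) []) := by
  intro ys
  induction ys with
  | nil => intro seen processed _; rfl
  | cons y ys ih =>
    intro seen processed h
    have hsplit := fdgo_append (ys.flatMap S) (S y) seen (S y ++ seen)
      (fun x => by simp)
    rw [List.flatMap_cons, hsplit]
    have hnext : ∀ x, x ∈ S y ++ seen ↔ ∃ y' ∈ y :: processed, x ∈ S y' := by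
      intro x
      simp only [List.mem_append, h x, List.mem_cons]
      constructor
      · rintro (hx | ⟨y', hy', hx⟩)
        · exact ⟨y, Or.inl rfl, hx⟩
        · exact ⟨y', Or.inr hy', hx⟩
      · rintro ⟨y', hy' | hy', hx⟩
        · exact Or.inl (hy' ▸ hx)
        · exact Or.inr ⟨y', hy', hx⟩
    by_cases hy : y ∈ processed
    · have h1 : fdgo (S y) seen = [] :=
        fdgo_nil_of_sub _ _ (fun x hx => (h x).mpr ⟨y, hy, hx⟩)
      have h2 : fdgo ys (y :: processed) = fdgo ys processed :=
        fdgo_congr_seen ys _ _ (fun x _ => by simp [List.mem_cons]; intro hx; exact hx ▸ hy)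
      rw [h1, ih (S y ++ seen) (y :: processed) hnext, h2, fdgo, if_pos hy]
      simp
    · have h1 : fdgo (S y) seen = fdgo (S y) [] := by
        apply fdgo_congr_seen
        intro x hx
        simp only [List.mem_nil_iff, iff_false]
        intro hc
        obtain ⟨y', hy', hx'⟩ := (h x).mp hc
        exact hdisj y' y x (fun he => hy (he ▸ hy')) hx' hx
      rw [h1, ih (S y ++ seen) (y :: processed) hnext, fdgo, if_neg hy]
      simp

lemma fdgo_filter {α : Type} [DecidableEq α] (p : α → Bool) :
    ∀ (l s1 s2 : List α), (∀ x, p x = true → (x ∈ s1 ↔ x ∈ s2)) →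
      fdgo (l.filter p) s1 = (fdgo l s2).filter p := by
  intro l
  induction l with
  | nil => intro s1 s2 _; rfl
  | cons x xs ih =>
    intro s1 s2 h
    by_cases hp : p x = true
    · rw [List.filter_cons_of_pos hp]
      by_cases hx : x ∈ s2
      · rw [fdgo, if_pos ((h x hp).mpr hx), fdgo, if_pos hx]
        exact ih s1 s2 h
      · rw [fdgo, if_neg (fun hc => hx ((h x hp).mp hc)), fdgo, if_neg hx,
          List.filter_cons_of_pos hp]
        congr 1
        exact ih (x :: s1) (x :: s2) (fun y hy => by
          by_cases hyx : y = x <;> simp [hyx, h y hy])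
    · rw [List.filter_cons_of_neg hp]
      by_cases hx : x ∈ s2
      · rw [fdgo, if_pos hx]
        exact ih s1 s2 h
      · rw [fdgo, if_neg hx, List.filter_cons_of_neg hp]
        exact ih s1 (x :: s2) (fun y hy => by
          have hyx : y ≠ x := fun he => hp (he ▸ hy)
          simp [hyx, h y hy])

lemma mem_subN (x : Int) : ∀ (zs : List Int) (m : Nat), x ∈ subN zs m → x ∈ zs := by
  intro zs
  induction zs with
  | nil => intro m h; simp [subN] at h
  | cons z zs ih =>
    intro m h
    rw [subN, List.mem_append] at h
    rcases h with h | h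
    · split at h <;> simp_all
    · exact List.mem_cons_of_mem _ (ih _ h)

lemma subN_append (ys : List Int) : ∀ (xs : List Int) (m : Nat),
    subN (xs ++ ys) m = subN xs m ++ subN ys (m / 2 ^ xs.length) := by
  intro xs
  induction xs with
  | nil => intro m; simp [subN]
  | cons x xs ih =>
    intro m
    have hdd : m / 2 / 2 ^ xs.length = m / 2 ^ (x :: xs).length := by
      rw [Nat.div_div_eq_div_mul, List.length_cons, pow_succ']
    rw [List.cons_append, subN, subN, ih (m / 2), List.append_assoc, hdd]

lemma subN_add_mul : ∀ (zs : List Int) (hi lo : Nat),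
    subN zs (hi * 2 ^ zs.length + lo) = subN zs lo := by
  intro zs
  induction zs with
  | nil => intro hi lo; rfl
  | cons z zs ih =>
    intro hi lo
    have h2 : hi * 2 ^ (z :: zs).length + lo = 2 * (hi * 2 ^ zs.length) + lo := by
      rw [List.length_cons, pow_succ]; ring
    have hmod : (2 * (hi * 2 ^ zs.length) + lo) % 2 = lo % 2 := Nat.mul_add_mod 2 _ lo
    have hdiv : (2 * (hi * 2 ^ zs.length) + lo) / 2 = hi * 2 ^ zs.length + lo / 2 :=
      Nat.mul_add_div (by norm_num) _ _
    rw [h2, subN, subN, hmod, hdiv, ih]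

lemma subN_replicate (u : Int) : ∀ (c m : Nat),
    subN (List.replicate c u) m = List.replicate (pcN c m) u := by
  intro c
  induction c with
  | zero => intro m; simp [subN, pcN]
  | succ c ih =>
    intro m
    rw [List.replicate_succ, subN, pcN, ih, List.replicate_add]
    congr 1
    rcases Nat.mod_two_eq_zero_or_one m with h | h <;> simp [h]

lemma pcN_le : ∀ (c m : Nat), pcN c m ≤ c := by
  intro c
  induction c with
  | zero => intro m; simp [pcN]
  | succ c ih =>
    intro m
    have h1 := ih (m / 2)
    have h2 := Nat.mod_two_eq_zero_or_one m
    rw [pcN]; omega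

lemma pcN_zero : ∀ (c : Nat), pcN c 0 = 0 := by
  intro c
  induction c with
  | zero => rfl
  | succ c ih => rw [pcN, Nat.zero_mod, Nat.zero_div, ih]

lemma pcN_low : ∀ (c m : Nat), m < 2 ^ c → pcN (c + 1) m = pcN c m := by
  intro c
  induction c with
  | zero =>
    intro m hm
    interval_cases m
    simp [pcN]
  | succ c ih =>
    intro m hm
    have hdiv : m / 2 < 2 ^ c := by
      apply Nat.div_lt_of_lt_mul
      rw [← pow_succ']
      exact hm
    rw [pcN, ih (m / 2) hdiv, pcN]

lemma pcN_high : ∀ (c m : Nat), m < 2 ^ c → pcN (c + 1) (2 ^ c + m) = pcN c m + 1 := by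
  intro c
  induction c with
  | zero =>
    intro m hm
    interval_cases m
    simp [pcN]
  | succ c ih =>
    intro m hm
    have he : 2 ^ (c + 1) + m = 2 * 2 ^ c + m := by rw [pow_succ']
    have hmod : (2 * 2 ^ c + m) % 2 = m % 2 := Nat.mul_add_mod 2 _ m
    have hdiv : (2 * 2 ^ c + m) / 2 = 2 ^ c + m / 2 := Nat.mul_add_div (by norm_num) _ _
    have hlt : m / 2 < 2 ^ c := by
      apply Nat.div_lt_of_lt_mul
      rw [← pow_succ']
      exact hm
    rw [pcN, he, hmod, hdiv, ih (m / 2) hlt, pcN]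
    ring

lemma pcN_ones : ∀ (c v : Nat), v ≤ c → pcN c (2 ^ v - 1) = v := by
  intro c
  induction c with
  | zero => intro v hv; interval_cases v; rfl
  | succ c ih =>
    intro v hv
    match v with
    | 0 => simpa using pcN_zero (c + 1)
    | w + 1 =>
      have h1 : (1 : Nat) ≤ 2 ^ w := Nat.one_le_two_pow
      have he : 2 ^ (w + 1) - 1 = 2 * (2 ^ w - 1) + 1 := by
        rw [pow_succ']; omega
      have hmod : (2 * (2 ^ w - 1) + 1) % 2 = 1 := by omega
      have hdiv : (2 * (2 ^ w - 1) + 1) / 2 = 2 ^ w - 1 := by omega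
      rw [pcN, he, hmod, hdiv, ih w (by omega)]
      omega

lemma fd_pc : ∀ (c : Nat), fdgo ((List.range (2 ^ c)).map (pcN c)) [] = List.range (c + 1) := by
  intro c
  induction c with
  | zero => decide
  | succ c ih =>
    have hsum : 2 ^ (c + 1) = 2 ^ c + 2 ^ c := by rw [pow_succ]; ring
    have hP1 : (List.range (2 ^ c)).map (pcN (c + 1)) = (List.range (2 ^ c)).map (pcN c) :=
      List.map_congr_left (fun m hm => pcN_low c m (List.mem_range.mp hm))
    have hP2 : ((List.range (2 ^ c)).map (2 ^ c + ·)).map (pcN (c + 1))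
        = (List.range (2 ^ c)).map (fun m => pcN c m + 1) := by
      rw [List.map_map]
      exact List.map_congr_left (fun m hm => pcN_high c m (List.mem_range.mp hm))
    have hrange : List.range (2 ^ (c + 1))
        = List.range (2 ^ c) ++ (List.range (2 ^ c)).map (2 ^ c + ·) := by
      rw [hsum, List.range_add]
    rw [hrange, List.map_append, hP1, hP2]
    rw [fdgo_append _ _ [] ((List.range (2 ^ c)).map (pcN c)) (fun x => by simp)]
    rw [ih]
    have hone : (1 : Nat) ≤ 2 ^ c := Nat.one_le_two_pow
    have hsingle : fdgo ((List.range (2 ^ c)).map (fun m => pcN c m + 1))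
        ((List.range (2 ^ c)).map (pcN c)) = [c + 1] := by
      apply fdgo_single
      · refine List.mem_map.mpr ⟨2 ^ c - 1, List.mem_range.mpr (by omega), ?_⟩
        rw [pcN_ones c c le_rfl]
      · intro hc
        obtain ⟨m, _, hm⟩ := List.mem_map.mp hc
        have := pcN_le c m
        omega
      · intro x hx
        obtain ⟨m, _, hm⟩ := List.mem_map.mp hx
        have hle := pcN_le c m
        by_cases he : pcN c m = c
        · left; omega
        · right
          refine List.mem_map.mpr ⟨2 ^ (pcN c m + 1) - 1, List.mem_range.mpr ?_, ?_⟩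
          · have : 2 ^ (pcN c m + 1) ≤ 2 ^ c := Nat.pow_le_pow_right (by norm_num) (by omega)
            omega
          · rw [pcN_ones c (pcN c m + 1) (by omega)]
            omega
    rw [hsingle, ← List.range_succ]

lemma map_range_mul {β : Type} (m : Nat) (f : Nat → β) : ∀ (b : Nat),
    (List.range (m * b)).map f
      = (List.range b).flatMap (fun hi => (List.range m).map (fun lo => f (hi * m + lo))) := by
  intro b
  induction b with
  | zero => simp
  | succ b ih =>
    have he : m * (b + 1) = m * b + m := by ring
    rw [he, List.range_add, List.map_append, ih, List.range_succ, List.flatMap_append,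
      List.map_map]
    congr 1
    rw [List.flatMap_cons, List.flatMap_nil, List.append_nil]
    exact List.map_congr_left (fun lo _ => by simp [Nat.mul_comm, Nat.add_comm])

lemma mem_seq2For (x : Int) (k' : Nat) : ∀ (rs : List Int), x ∈ seq2For k' rs → x ∈ rs := by
  intro rs
  induction rs with
  | nil => intro h; simp [seq2For] at h
  | cons u rest ih =>
    intro h
    rw [seq2For, List.mem_append] at h
    rcases h with h | h
    · exact List.mem_cons_of_mem _ (ih h)
    · simp [List.eq_of_mem_replicate h]

lemma seq2For_append_singleton (k' : Nat) (u : Int) : ∀ (l : List Int),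
    seq2For k' (l ++ [u]) = List.replicate k' u ++ seq2For k' l := by
  intro l
  induction l with
  | nil => simp [seq2For]
  | cons x l ih =>
    rw [List.cons_append, seq2For, ih, seq2For, List.append_assoc]

lemma seq2For_reverse (k' : Nat) : ∀ (us : List Int),
    seq2For k' us.reverse = us.flatMap (fun u => List.replicate k' u) := by
  intro us
  induction us with
  | nil => rfl
  | cons u us ih =>
    rw [List.reverse_cons, seq2For_append_singleton, ih, List.flatMap_cons]

-- the heart: first-occurrence dedup of the bitmask enumeration is the colex count enumeration
lemma fd_map_subN (k' : Nat) : ∀ (rs : List Int), rs.Nodup →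
    fdgo ((List.range (2 ^ (seq2For k' rs).length)).map (subN (seq2For k' rs))) [] = genAll k' rs := by
  intro rs
  induction rs with
  | nil => intro _; rfl
  | cons u rest ih =>
    intro hnd
    have hu : u ∉ rest := (List.nodup_cons.mp hnd).1
    have hnd' : rest.Nodup := (List.nodup_cons.mp hnd).2
    have hdef : seq2For k' (u :: rest) = seq2For k' rest ++ List.replicate k' u := rfl
    have hpow : 2 ^ (seq2For k' rest ++ List.replicate k' u).length
        = 2 ^ (seq2For k' rest).length * 2 ^ k' := by
      rw [List.length_append, List.length_replicate, pow_add]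
    rw [hdef, hpow, map_range_mul]
    have hL : ∀ hi ∈ List.range (2 ^ k'),
        (List.range (2 ^ (seq2For k' rest).length)).map
            (fun lo => subN (seq2For k' rest ++ List.replicate k' u)
              (hi * 2 ^ (seq2For k' rest).length + lo))
          = ((List.range (2 ^ (seq2For k' rest).length)).map (subN (seq2For k' rest))).map
              (· ++ List.replicate (pcN k' hi) u) := by
      intro hi _
      rw [List.map_map]
      apply List.map_congr_left
      intro lo hlo
      have hlo' : lo < 2 ^ (seq2For k' rest).length := List.mem_range.mp hlo
      have hdiv : (hi * 2 ^ (seq2For k' rest).length + lo) / 2 ^ (seq2For k' rest).length = hi := by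
        rw [Nat.mul_comm hi, Nat.mul_add_div (Nat.two_pow_pos _),
          Nat.div_eq_of_lt hlo', Nat.add_zero]
      rw [subN_append, subN_add_mul, hdiv, subN_replicate]
      rfl
    rw [List.flatMap_congr hL]
    have hcomp : (List.range (2 ^ k')).flatMap (fun hi =>
          ((List.range (2 ^ (seq2For k' rest).length)).map (subN (seq2For k' rest))).map
            (· ++ List.replicate (pcN k' hi) u))
        = ((List.range (2 ^ k')).map (pcN k')).flatMap (fun c =>
            ((List.range (2 ^ (seq2For k' rest).length)).map (subN (seq2For k' rest))).map
              (· ++ List.replicate c u)) := by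
      rw [List.flatMap_map]
    rw [hcomp]
    have hnotu : ∀ v ∈ (List.range (2 ^ (seq2For k' rest).length)).map (subN (seq2For k' rest)),
        u ∉ v := by
      intro v hv hcon
      obtain ⟨lo, _, rfl⟩ := List.mem_map.mp hv
      exact hu (mem_seq2For u k' rest (mem_subN u (seq2For k' rest) lo hcon))
    have hdisj : ∀ (c c' : Nat) (x : List Int), c ≠ c' →
        x ∈ ((List.range (2 ^ (seq2For k' rest).length)).map (subN (seq2For k' rest))).map
              (· ++ List.replicate c u) →
        x ∉ ((List.range (2 ^ (seq2For k' rest).length)).map (subN (seq2For k' rest))).map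
              (· ++ List.replicate c' u) := by
      intro c c' x hne hxc hxc'
      obtain ⟨v, hv, hveq⟩ := List.mem_map.mp hxc
      obtain ⟨w, hw, hweq⟩ := List.mem_map.mp hxc'
      have hcount : x.count u = c := by
        rw [← hveq, List.count_append, List.count_replicate_self,
          List.count_eq_zero.mpr (hnotu v hv), Nat.zero_add]
      have hcount' : x.count u = c' := by
        rw [← hweq, List.count_append, List.count_replicate_self,
          List.count_eq_zero.mpr (hnotu w hw), Nat.zero_add]
      omega
    rw [fdgo_flatMap _ hdisj _ [] [] (by simp)]
    rw [fd_pc k']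
    rw [genAll]
    apply List.flatMap_congr
    intro c _
    have hmap : fdgo (((List.range (2 ^ (seq2For k' rest).length)).map (subN (seq2For k' rest))).map
          (· ++ List.replicate c u)) []
        = (fdgo ((List.range (2 ^ (seq2For k' rest).length)).map (subN (seq2For k' rest))) []).map
            (· ++ List.replicate c u) :=
      fdgo_map (· ++ List.replicate c u)
        (fun a b h => List.append_cancel_right h) _ []
    rw [hmap, ih hnd']

lemma filter_genAll (k' : Nat) : ∀ (rs : List Int) (b : Nat), b ≤ k' →
    (genAll k' rs).filter (fun x => decide (x.length = b)) = genN rs b := by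
  intro rs
  induction rs with
  | nil =>
    intro b hb
    rw [genAll, genN]
    by_cases hb0 : b = 0
    · subst hb0; rfl
    · simp [List.filter, hb0, Ne.symm hb0]
  | cons u rest ih =>
    intro b hb
    rw [genAll, genN, List.filter_flatMap]
    have hinner : ∀ c, (((genAll k' rest).map (· ++ List.replicate c u)).filter
          (fun x => decide (x.length = b)))
        = ((genAll k' rest).filter (fun v => decide (v.length + c = b))).map
            (· ++ List.replicate c u) := by
      intro c
      rw [List.filter_map]
      congr 1
      apply List.filter_congr
      intro v _
      simp [Function.comp]
    simp only [hinner]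
    rw [show k' + 1 = (b + 1) + (k' - b) by omega, List.range_add, List.flatMap_append]
    have hpart2 : (((List.range (k' - b)).map (fun x => b + 1 + x)).flatMap (fun c =>
          ((genAll k' rest).filter (fun v => decide (v.length + c = b))).map
            (· ++ List.replicate c u))) = [] := by
      rw [List.flatMap_map]
      apply List.flatMap_eq_nil_iff.mpr
      intro d _
      rw [List.filter_eq_nil_iff.mpr (fun v _ => by simp; omega)]
      rfl
    rw [hpart2, List.append_nil]
    apply List.flatMap_congr
    intro c hc
    have hcb : c ≤ b := by
      have := List.mem_range.mp hc
      omega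
    have hfix : (genAll k' rest).filter (fun v => decide (v.length + c = b))
        = (genAll k' rest).filter (fun v => decide (v.length = b - c)) := by
      apply List.filter_congr
      intro v _
      simp only [decide_eq_decide]
      omega
    rw [hfix, ih (b - c) (by omega)]

lemma pvGen_neg (rs : List Int) (b : Int) (hb : b < 0) : pvGen rs b = [] := by
  cases rs with
  | nil => rw [pvGen, if_neg (by omega)]
  | cons u rest => rw [pvGen, PySem.List.pyRange_one_eq_nil (by omega)]; rfl

lemma pvGen_eq : ∀ (rs : List Int) (b : Int), 0 ≤ b → pvGen rs b = genN rs b.toNat := by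
  intro rs
  induction rs with
  | nil =>
    intro b hb
    rw [pvGen, genN]
    by_cases hb0 : b = 0
    · rw [if_pos hb0, if_pos (by omega)]
    · rw [if_neg hb0, if_neg (by omega)]
  | cons u rest ih =>
    intro b hb
    rw [pvGen, genN]
    have hbody : ∀ (out : List (List Int)) (c : Int),
        (pvGen rest (b - c)).foldl (fun out r => out ++ [r ++ PySem.List.pyRepeat [u] c]) out
          = out ++ (pvGen rest (b - c)).map (· ++ PySem.List.pyRepeat [u] c) :=
      fun out c => PySem.List.foldl_append_singleton_eq_map _ _ _
    simp only [hbody]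
    rw [PySem.List.foldl_append_eq_flatMap, List.nil_append]
    rw [PySem.List.pyRange_one 0 (b + 1), List.flatMap_map]
    have hlen : (b + 1 - 0).toNat = b.toNat + 1 := by omega
    rw [hlen]
    apply List.flatMap_congr
    intro c hc
    have hc' : (c : Int) ≤ b := by
      have := List.mem_range.mp hc
      omega
    rw [show ((0 : Int) + (c : Int)) = (c : Int) by ring]
    rw [PySem.List.pyRepeat_singleton, Int.toNat_natCast]
    have hnat : (b - (c : Int)).toNat = b.toNat - c := by omega
    rw [ih (b - (c : Int)) (by omega), hnat]

-- A's inner bit loop is subN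
lemma filt_sub : ∀ (zs : List Int) (m : Nat),
    ((List.range zs.length).filter (fun j => decide (m / 2 ^ j % 2 = 1))).map
        (fun j => zs.getD j 0)
      = subN zs m := by
  intro zs
  induction zs with
  | nil => intro m; simp [subN]
  | cons z zs ih =>
    intro m
    rw [List.length_cons, List.range_succ_eq_map, List.filter_cons]
    have hfm : List.filter (fun j => decide (m / 2 ^ j % 2 = 1)) (List.map Nat.succ (List.range zs.length))
        = List.map Nat.succ (List.filter (fun j => decide (m / 2 / 2 ^ j % 2 = 1)) (List.range zs.length)) := by
      rw [List.filter_map]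
      congr 1
      apply List.filter_congr
      intro j _
      have hdd : m / 2 ^ Nat.succ j = m / 2 / 2 ^ j := by
        rw [Nat.div_div_eq_div_mul, ← pow_succ']
      simp [Function.comp, hdd]
    have htail : List.map (fun j => (z :: zs).getD j 0)
          (List.map Nat.succ (List.filter (fun j => decide (m / 2 / 2 ^ j % 2 = 1)) (List.range zs.length)))
        = subN zs (m / 2) := by
      rw [List.map_map, ← ih (m / 2)]
      apply List.map_congr_left
      intro j _
      simp [Function.comp]
    rw [subN]
    by_cases hm : m % 2 = 1
    · rw [if_pos (by simpa using hm), if_pos hm]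
      rw [List.map_cons, hfm, List.getD_cons_zero, htail]
      rfl
    · rw [if_neg (by simpa using hm), if_neg hm]
      rw [hfm, htail]
      rfl

lemma inner_eq (zs : List Int) (i : Int) (hi : 0 ≤ i) :
    combinlisteInner zs i = subN zs i.toNat := by
  lift i to Nat using hi with m
  rw [Int.toNat_natCast, combinlisteInner, sub_add_cancel]
  rw [PySem.List.foldl_append_ite]
  rw [List.nil_append, PySem.List.pyRange_one 0 (zs.length : Int)]
  rw [List.filter_map, List.map_map]
  have hcast : ((zs.length : Int) - 0).toNat = zs.length := by omega
  rw [hcast]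
  have hfilter : ∀ (q q' : Nat → Bool), (∀ j ∈ List.range zs.length, q j = q' j) →
      List.filter q (List.range zs.length) = List.filter q' (List.range zs.length) :=
    fun q q' h => List.filter_congr h
  rw [hfilter _ (fun j => decide (m / 2 ^ j % 2 = 1)) (fun j hj => by
    have h0 : ((0 : Int) + (j : Int)) = (j : Int) := by ring
    have hsh : ((m : Int) >>> (((j : Nat) : Int))) = ((m >>> j : Nat) : Int) := by
      simp [Int.natCast_shiftRight]
    have h3 : PySem.Int.mod ((m / 2 ^ j : Nat) : Int) 2 = ((m / 2 ^ j % 2 : Nat) : Int) := by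
      exact_mod_cast PySem.Int.mod_natCast (m / 2 ^ j) 2
    simp only [Function.comp, h0, Int.toNat_natCast, hsh, PySem.Int.band_one, h3,
      Nat.shiftRight_eq_div_pow, decide_eq_decide]
    constructor
    · intro h; exact_mod_cast h
    · intro h; exact_mod_cast h)]
  rw [← filt_sub zs m]
  apply List.map_congr_left
  intro j _
  simp [Function.comp]

lemma combinliste_eq (zs : List Int) (k : Int) :
    combinliste zs k
      = ((List.range (2 ^ zs.length)).map (subN zs)).filter (fun s => decide ((s.length : Int) = k)) := by
  rw [combinliste, sub_add_cancel]
  have hrange : PySem.List.pyRange 0 ((2 : Int) ^ zs.length) 1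
      = (List.range (2 ^ zs.length)).map (fun n : Nat => (n : Int)) := by
    rw [PySem.List.pyRange_one]
    have h20 : ((2 : Int) ^ zs.length - 0).toNat = 2 ^ zs.length := by
      rw [sub_zero, show ((2 : Int) ^ zs.length) = ((2 ^ zs.length : Nat) : Int) by push_cast; ring,
        Int.toNat_natCast]
    rw [h20]
    apply List.map_congr_left
    intro n _
    ring
  rw [hrange, List.foldl_map]
  simp only [inner_eq _ _ (Int.natCast_nonneg _), Int.toNat_natCast]
  rw [PySem.List.foldl_append_ite]
  rw [List.nil_append, List.filter_map]
  rfl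

-- A's dedup-and-filter loop
lemma foldl_dedup_filter :
    ∀ (l acc seen : List (List Int)),
      (∀ x, 1 < PySem.Set.len (PySem.Set.ofList x) → (x ∈ acc ↔ x ∈ seen)) →
      l.foldl (fun p2 x =>
          if x ∉ p2 ∧ 1 < PySem.Set.len (PySem.Set.ofList x) then p2 ++ [x] else p2) acc
        = acc ++ (fdgo l seen).filter (fun x => decide (1 < PySem.Set.len (PySem.Set.ofList x))) := by
  intro l
  induction l with
  | nil => intro acc seen _; simp [fdgo]
  | cons x xs ih =>
    intro acc seen h
    by_cases hseen : x ∈ seen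
    · by_cases hp : 1 < PySem.Set.len (PySem.Set.ofList x)
      · have hacc : x ∈ acc := (h x hp).mpr hseen
        rw [List.foldl_cons, if_neg (by simp [hacc]), fdgo, if_pos hseen]
        exact ih acc seen h
      · rw [List.foldl_cons, if_neg (fun hc => hp hc.2), fdgo, if_pos hseen]
        exact ih acc seen h
    · by_cases hp : 1 < PySem.Set.len (PySem.Set.ofList x)
      · have hacc : x ∉ acc := fun hc => hseen ((h x hp).mp hc)
        rw [List.foldl_cons, if_pos ⟨hacc, hp⟩, fdgo, if_neg hseen,
          List.filter_cons_of_pos (by simpa using hp)]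
        rw [ih (acc ++ [x]) (x :: seen) (fun y hy => by
          simp only [List.mem_append, List.mem_cons, h y hy]
          tauto)]
        simp
      · rw [List.foldl_cons, if_neg (fun hc => hp hc.2), fdgo, if_neg hseen,
          List.filter_cons_of_neg (by simpa using hp)]
        exact ih acc (x :: seen) (fun y hy => by
          have hyx : y ≠ x := fun he => hp (he ▸ hy)
          simp [hyx, h y hy])

-- B's uniques loop
lemma foldl_uniq {α : Type} [DecidableEq α] :
    ∀ (l acc seen : List α), (∀ x, x ∈ acc ↔ x ∈ seen) →
      l.foldl (fun u e => if e ∉ u then u ++ [e] else u) acc = acc ++ fdgo l seen := by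
  intro l
  induction l with
  | nil => intro acc seen _; simp [fdgo]
  | cons x xs ih =>
    intro acc seen h
    by_cases hx : x ∈ seen
    · have hacc : x ∈ acc := (h x).mpr hx
      rw [List.foldl_cons, if_neg (by simp [hacc]), fdgo, if_pos hx]
      exact ih acc seen h
    · have hacc : x ∉ acc := fun hc => hx ((h x).mp hc)
      rw [List.foldl_cons, if_pos hacc, fdgo, if_neg hx]
      rw [ih (acc ++ [x]) (x :: seen) (fun y => by
        simp only [List.mem_append, List.mem_cons, h y]
        tauto)]
      simp

-- A's seq2 loop, k ≥ 1
lemma foldl_seq2 (k : Int) (hk : 1 ≤ k) :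
    ∀ (l acc seen : List Int), (∀ x, x ∈ acc ↔ x ∈ seen) →
      l.foldl (fun seq2 elem =>
          if elem ∉ seq2 then
            (PySem.List.pyRange 0 k 1).foldl (fun seq2 _ => seq2 ++ [elem]) seq2
          else seq2) acc
        = acc ++ (fdgo l seen).flatMap (fun u => List.replicate k.toNat u) := by
  have hinner : ∀ (e : Int) (s2 : List Int),
      (PySem.List.pyRange 0 k 1).foldl (fun s2 _ => s2 ++ [e]) s2
        = s2 ++ List.replicate k.toNat e := by
    intro e s2
    rw [PySem.List.foldl_append_singleton_eq_map (fun _ : Int => e), List.map_const',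
      PySem.List.length_pyRange_one]
    congr 2
    omega
  have hk0 : k.toNat ≠ 0 := by omega
  intro l
  induction l with
  | nil => intro acc seen _; simp [fdgo]
  | cons x xs ih =>
    intro acc seen h
    by_cases hx : x ∈ seen
    · have hacc : x ∈ acc := (h x).mpr hx
      rw [List.foldl_cons, if_neg (by simp [hacc]), fdgo, if_pos hx]
      exact ih acc seen h
    · have hacc : x ∉ acc := fun hc => hx ((h x).mp hc)
      rw [List.foldl_cons, if_pos hacc, hinner, fdgo, if_neg hx]
      rw [ih (acc ++ List.replicate k.toNat x) (x :: seen) (fun y => by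
        simp only [List.mem_append, List.mem_replicate, List.mem_cons, h y]
        tauto)]
      rw [List.flatMap_cons, List.append_assoc]

-- A's seq2 loop, k ≤ 0: nothing is ever appended
lemma foldl_seq2_nonpos (k : Int) (hk : k ≤ 0) :
    ∀ (l acc : List Int),
      l.foldl (fun seq2 elem =>
          if elem ∉ seq2 then
            (PySem.List.pyRange 0 k 1).foldl (fun seq2 _ => seq2 ++ [elem]) seq2
          else seq2) acc = acc := by
  intro l
  induction l with
  | nil => intro acc; rfl
  | cons x xs ih =>
    intro acc
    rw [List.foldl_cons]
    have hstep : (if x ∉ acc then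
        (PySem.List.pyRange 0 k 1).foldl (fun seq2 _ => seq2 ++ [x]) acc else acc) = acc := by
      split
      · rw [PySem.List.pyRange_one_eq_nil hk]; rfl
      · rfl
    rw [hstep]
    exact ih acc

-- ===== VERDICT (by name: the statement is the Claim_ definition above) =====
lemma alt_eq_filter_genN (seq : List Int) (k : Int) (hk : 0 ≤ k) :
    combinlisterep_alt seq k
      = (genN ((fdgo seq ([] : List Int)).reverse) k.toNat).filter
          (fun x => 1 < PySem.Set.len (PySem.Set.ofList x)) := by
  rw [combinlisterep_alt]
  rw [foldl_uniq seq [] [] (by simp)]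
  rw [List.nil_append, PySem.List.slice?_none_none_neg_one, Option.getD_some]
  rw [pvGen_eq _ k hk]

lemma a_eq_filter_genN (seq : List Int) (k : Int) (hk : 0 ≤ k) :
    combinlisterep seq k
      = (genN ((fdgo seq ([] : List Int)).reverse) k.toNat).filter
          (fun x => decide (1 < PySem.Set.len (PySem.Set.ofList x))) := by
  rw [combinlisterep]
  have hseq2 : seq.foldl (fun seq2 elem =>
      if elem ∉ seq2 then
        (PySem.List.pyRange 0 k 1).foldl (fun seq2 _ => seq2 ++ [elem]) seq2
      else seq2) []
      = (fdgo seq ([] : List Int)).flatMap (fun u => List.replicate k.toNat u) := by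
    by_cases hk1 : 1 ≤ k
    · simpa using foldl_seq2 k hk1 seq [] [] (by simp)
    · have hk0 : k = 0 := by omega
      subst hk0
      rw [foldl_seq2_nonpos 0 le_rfl seq []]
      simp
  rw [hseq2]
  have hs2 : (fdgo seq ([] : List Int)).flatMap (fun u => List.replicate k.toNat u)
      = seq2For k.toNat ((fdgo seq ([] : List Int)).reverse) := by
    rw [seq2For_reverse]
  rw [hs2, combinliste_eq]
  rw [foldl_dedup_filter _ [] [] (by simp)]
  rw [List.nil_append]
  rw [fdgo_filter _ _ [] [] (by simp)]
  rw [fd_map_subN k.toNat _ (List.nodup_reverse.mpr (nodup_fdgo seq []))]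
  have hq : (genAll k.toNat ((fdgo seq ([] : List Int)).reverse)).filter
        (fun s => decide ((s.length : Int) = k))
      = (genAll k.toNat ((fdgo seq ([] : List Int)).reverse)).filter
          (fun s => decide (s.length = k.toNat)) := by
    apply List.filter_congr
    intro v _
    simp only [decide_eq_decide]
    omega
  rw [hq, filter_genAll k.toNat _ k.toNat le_rfl]

theorem combinlisterep_spec : Claim_equal_combinlisterep := by
  intro seq k _hdom
  show combinlisterep seq k = combinlisterep_alt seq k
  by_cases hk : 0 ≤ k
  · rw [a_eq_filter_genN seq k hk, alt_eq_filter_genN seq k hk]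
  · -- k < 0: both sides are []
    have hkneg : k < 0 := by omega
    have hA : combinlisterep seq k = [] := by
      rw [combinlisterep, foldl_seq2_nonpos k (by omega) seq [], combinliste_eq]
      have : (((List.range (2 ^ ([] : List Int).length)).map (subN [])).filter
          (fun s => decide ((s.length : Int) = k))) = [] := by
        apply List.filter_eq_nil_iff.mpr
        intro x hx
        obtain ⟨m, _, rfl⟩ := List.mem_map.mp hx
        simp only [subN, decide_eq_true_eq]
        omega
      rw [this]
      rfl
    have hB : combinlisterep_alt seq k = [] := by
      rw [combinlisterep_alt, pvGen_neg _ k hkneg]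
      rfl
    rw [hA, hB]
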